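-- pv_equiv track=rewrite | github.com/ilia054/Citation-Predictions | CitationPrediction.py | group_walks_by_length
-- ===== SOURCE A (Python) =====
-- def group_walks_by_length(walks):
--     # Initialize a dictionary to hold walks grouped by their length
--     grouped_walks = {}
--
--     # Iterate over each walk in the input list
--     for walk in walks:
--         # Determine the length of the current walk
--         length = len(walk)
--
--         # If this length hasn't been encountered yet, initialize a new list
--         if length not in grouped_walks:
--             grouped_walks[length] = []
--
--         # Append the current walk to the appropriate list based on its length
--         grouped_walks[length].append(walk)
--
--     # Now, grouped_walks contains walks grouped by length. Let's convert it to a list of lists.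
--     # Note: This step is optional depending on whether you need the output as a dictionary or a list of lists.
--     # The following line extracts only the values (which are lists of walks) and converts them to a list
--     grouped_walks_list = list(grouped_walks.values())
--
--     return grouped_walks_list
-- ===== SOURCE B (Python) =====
-- def group_walks_by_length(walks):
--     # Distinct walk lengths in first-occurrence order, then one filtering
--     # pass per distinct length.
--     lengths = list(dict.fromkeys(len(w) for w in walks))
--     return [[w for w in walks if len(w) == L] for L in lengths]
-- ===== Notes on version B (the rewrite author's own statement) =====
-- stated objective: alternative
-- what changed: Replaces the single dict-bucketing pass (conditional key init + append per walk, then .values()) by first collecting the distinct lengths in first-occurrence order and then building each group with a separate filter pass over the full list.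
import Mathlib
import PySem

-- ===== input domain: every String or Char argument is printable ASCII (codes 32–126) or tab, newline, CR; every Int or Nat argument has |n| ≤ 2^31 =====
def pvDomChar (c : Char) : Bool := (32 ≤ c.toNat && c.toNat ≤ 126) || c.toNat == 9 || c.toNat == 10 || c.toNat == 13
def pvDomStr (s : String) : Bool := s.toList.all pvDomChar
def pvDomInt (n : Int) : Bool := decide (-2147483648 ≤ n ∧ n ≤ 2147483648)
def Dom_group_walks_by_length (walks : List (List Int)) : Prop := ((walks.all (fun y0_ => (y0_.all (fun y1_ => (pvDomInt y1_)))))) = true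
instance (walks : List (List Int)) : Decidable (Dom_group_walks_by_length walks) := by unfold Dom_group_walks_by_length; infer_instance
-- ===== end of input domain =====

-- B builds each group by a separate filter pass over the distinct lengths
-- (first-occurrence order) instead of A's single dict-bucketing pass: an
-- alternative decomposition, not claimed faster.

-- ===== PORT A =====
def group_walks_by_length (walks : List (List Int)) : List (List (List Int)) :=
  let grouped_walks := walks.foldl (fun d walk =>
    let length : Int := walk.length
    -- if length not in grouped_walks: grouped_walks[length] = []
    let d := if d.contains length then d else d.insert length ([] : List (List Int))
    -- grouped_walks[length].append(walk)
    d.insert length (d.getD length [] ++ [walk])) PySem.Dict.empty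
  grouped_walks.values

-- ===== PORT B =====
def group_walks_by_length_alt (walks : List (List Int)) : List (List (List Int)) :=
  let lengths := PySem.List.dedup (walks.map (fun w => (w.length : Int)))
  lengths.map (fun L => walks.filter (fun w => (w.length : Int) == L))

-- ===== PRECONDITION & SPEC =====
def Spec_group_walks_by_length (walks : List (List Int)) (out : List (List (List Int))) : Prop := out = group_walks_by_length_alt walks
instance (walks : List (List Int)) (out : List (List (List Int))) : Decidable (Spec_group_walks_by_length walks out) := by unfold Spec_group_walks_by_length; infer_instance

-- ===== CLAIM (what is proved, stated in full; the proofs are below) =====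
def Claim_equal_group_walks_by_length : Prop := ∀ (walks : List (List Int)), Dom_group_walks_by_length walks → Spec_group_walks_by_length walks (group_walks_by_length walks)

-- ===== LEMMAS AND PROOFS =====

-- A's loop body (conditional key init, then overwrite-insert of the appended
-- group) is exactly a `modify` with default [].
lemma stepA_eq_modify (d : PySem.Dict Int (List (List Int))) (walk : List Int) :
    (let length : Int := walk.length
     let d' := if d.contains length then d else d.insert length ([] : List (List Int))
     d'.insert length (d'.getD length [] ++ [walk]))
    = d.modify (walk.length : Int) [] (· ++ [walk]) := by
  by_cases h : d.contains (walk.length : Int)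
  · simp only [h, if_pos]
    apply PySem.Dict.ext
    simp [PySem.Dict.modify, PySem.Dict.getD_eq_get?_getD]
  · simp only [h, if_neg, Bool.false_eq_true, not_false_iff]
    rw [PySem.Dict.insert_insert_self]
    have hg : d.getD (walk.length : Int) [] = ([] : List (List Int)) :=
      PySem.Dict.getD_of_not_contains d ([] : List (List Int)) (by simpa using h)
    apply PySem.Dict.ext
    simp [PySem.Dict.modify, hg]

lemma foldA_eq_modify (walks : List (List Int)) (d : PySem.Dict Int (List (List Int))) :
    walks.foldl (fun d walk =>
      let length : Int := walk.length
      let d := if d.contains length then d else d.insert length ([] : List (List Int))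
      d.insert length (d.getD length [] ++ [walk])) d
    = walks.foldl (fun d walk => d.modify (walk.length : Int) [] (· ++ [walk])) d := by
  induction walks generalizing d with
  | nil => rfl
  | cons w ws ih =>
    simp only [List.foldl_cons, ih]
    congr 1
    exact stepA_eq_modify d w

-- ===== VERDICT (by name: the statement is the Claim_ definition above) =====
theorem group_walks_by_length_spec : Claim_equal_group_walks_by_length := by
  intro walks _
  unfold Spec_group_walks_by_length group_walks_by_length group_walks_by_length_alt
  simp only [foldA_eq_modify]
  set F := walks.foldl (fun d walk => d.modify (walk.length : Int) [] (· ++ [walk]))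
    PySem.Dict.empty with hF
  have hmap : F = (walks.map (fun w => ((w.length : Int), w))).foldl
      (fun d p => d.modify p.1 [] (· ++ [p.2])) PySem.Dict.empty := by
    rw [hF, List.foldl_map]
  have hnd : F.keys.Nodup := by
    rw [hF]
    exact PySem.Dict.nodup_keys_foldl_modify_key walks (fun w => (w.length : Int)) []
      (fun d w => (· ++ [w])) PySem.Dict.empty (by simp [PySem.Dict.keys_empty])
  have hkeys : F.keys = PySem.List.dedup (walks.map (fun w => (w.length : Int))) := by
    rw [hF, PySem.Dict.keys_foldl_modify_key]
    simp [PySem.Dict.keys_empty, PySem.Set.update_nil_left]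
  rw [PySem.Dict.values_eq_map_keys F hnd ([] : List (List Int)), hkeys]
  apply List.map_congr_left
  intro L _
  rw [hmap, PySem.Dict.getD_foldl_modify_append]
  simp [PySem.Dict.getD_empty, List.filter_map, Function.comp_def]
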